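-- pv_equiv track=rewrite | github.com/jojonki/atcoder | agc/agc39a.py | calc_dup_ct
-- ===== SOURCE A (Python) =====
-- def calc_dup_ct(S):
--     streak_c = ''
--     streak_ct = 0
--     dup_ct = 0
--     for c in S:
--         if c == streak_c:
--             streak_ct += 1
--             if streak_ct == 2:
--                 dup_ct += 1
--                 streak_ct = 0
--                 streak_c = ''
--         else:
--             streak_c = c
--             streak_ct = 1
--     return dup_ct
-- ===== SOURCE B (Python) =====
-- from itertools import groupby
--
-- def calc_dup_ct(S):
--     return sum(len(list(g)) // 2 for _, g in groupby(S))
-- ===== Notes on version B (the rewrite author's own statement) =====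
-- stated objective: simpler
-- what changed: Replaces the streak_c/streak_ct state-machine loop with a one-liner: split S into maximal runs via itertools.groupby and sum floor(len/2) per run.
import Mathlib
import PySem

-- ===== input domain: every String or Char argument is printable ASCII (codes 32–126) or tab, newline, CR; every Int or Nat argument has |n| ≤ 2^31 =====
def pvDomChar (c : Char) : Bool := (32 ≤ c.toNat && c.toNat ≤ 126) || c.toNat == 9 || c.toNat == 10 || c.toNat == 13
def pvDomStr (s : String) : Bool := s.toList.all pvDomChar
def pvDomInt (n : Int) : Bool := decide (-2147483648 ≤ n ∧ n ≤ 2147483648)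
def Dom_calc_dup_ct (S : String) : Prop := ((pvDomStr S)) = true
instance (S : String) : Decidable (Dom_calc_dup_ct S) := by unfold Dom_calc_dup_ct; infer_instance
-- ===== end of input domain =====

-- B replaces A's streak-state loop by summing floor(runLength/2) over maximal runs (simpler decomposition).

-- ===== PORT A =====
-- A's streak_c is '' or a single char; ported as Option Char (none = '').
def calc_dup_ct_loop : List Char → Option Char → Int → Int → Int
  | [], _, _, dup_ct => dup_ct
  | c :: rest, streak_c, streak_ct, dup_ct =>
    if some c = streak_c then
      if streak_ct + 1 = 2 then
        calc_dup_ct_loop rest none 0 (dup_ct + 1)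
      else
        calc_dup_ct_loop rest streak_c (streak_ct + 1) dup_ct
    else
      calc_dup_ct_loop rest (some c) 1 dup_ct

def calc_dup_ct (S : String) : Int :=
  calc_dup_ct_loop S.toList none 0 0

-- ===== PORT B =====
-- groupby: take the maximal leading run of c (its extra length and the remainder).
def pvSpanEq (c : Char) : List Char → Nat × List Char
  | [] => (0, [])
  | x :: xs =>
    if x = c then
      let p := pvSpanEq c xs
      (p.1 + 1, p.2)
    else
      (0, x :: xs)

theorem pvSpanEq_len (c : Char) (l : List Char) : (pvSpanEq c l).2.length ≤ l.length := by
  induction l with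
  | nil => simp [pvSpanEq]
  | cons x xs ih =>
    simp only [pvSpanEq]
    split
    · simpa using Nat.le_succ_of_le ih
    · simp

def calc_dup_ct_go : List Char → Int
  | [] => 0
  | c :: xs =>
    let p := pvSpanEq c xs
    ((p.1 + 1) / 2 : Nat) + calc_dup_ct_go p.2
  termination_by l => l.length
  decreasing_by
    exact Nat.lt_succ_of_le (pvSpanEq_len c xs)

def calc_dup_ct_alt (S : String) : Int :=
  calc_dup_ct_go S.toList

-- ===== PRECONDITION & SPEC =====
def Spec_calc_dup_ct (S : String) (out : Int) : Prop := out = calc_dup_ct_alt S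
instance (S : String) (out : Int) : Decidable (Spec_calc_dup_ct S out) := by unfold Spec_calc_dup_ct; infer_instance

-- ===== CLAIM (what is proved, stated in full; the proofs are below) =====
def Claim_equal_calc_dup_ct : Prop := ∀ (S : String), Dom_calc_dup_ct S → Spec_calc_dup_ct S (calc_dup_ct S)

-- ===== LEMMAS AND PROOFS =====

-- Dropping the leading run of c from l subtracts floor(n/2) from B's count.
theorem go_spanEq (c : Char) (l : List Char) :
    calc_dup_ct_go l = ((pvSpanEq c l).1 / 2 : Nat) + calc_dup_ct_go (pvSpanEq c l).2 := by
  cases l with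
  | nil => simp [pvSpanEq, calc_dup_ct_go]
  | cons x xs =>
    by_cases h : x = c
    · subst h
      simp only [pvSpanEq, if_true, calc_dup_ct_go]
    · simp [pvSpanEq, h, calc_dup_ct_go]

-- Combined loop invariant for the two reachable states of A's loop.
theorem loop_invariant (k : Nat) : ∀ (l : List Char), l.length ≤ k →
    (∀ d : Int, calc_dup_ct_loop l none 0 d = d + calc_dup_ct_go l) ∧
    (∀ (c : Char) (d : Int),
      calc_dup_ct_loop l (some c) 1 d =
        d + (((pvSpanEq c l).1 + 1) / 2 : Nat) + calc_dup_ct_go (pvSpanEq c l).2) := by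
  induction k with
  | zero =>
    intro l hl
    have : l = [] := List.eq_nil_of_length_eq_zero (Nat.le_zero.mp hl)
    subst this
    constructor
    · intro d; simp [calc_dup_ct_loop, calc_dup_ct_go]
    · intro c d; simp [calc_dup_ct_loop, pvSpanEq, calc_dup_ct_go]
  | succ k ih =>
    intro l hl
    constructor
    · intro d
      cases l with
      | nil => simp [calc_dup_ct_loop, calc_dup_ct_go]
      | cons c xs =>
        have hxs : xs.length ≤ k := Nat.le_of_succ_le_succ hl
        have h2 := (ih xs hxs).2 c d
        simp only [calc_dup_ct_loop, reduceCtorEq, if_false] at *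
        rw [h2]
        simp only [calc_dup_ct_go]
        push_cast
        ring
    · intro c d
      cases l with
      | nil => simp [calc_dup_ct_loop, pvSpanEq, calc_dup_ct_go]
      | cons x xs =>
        have hxs : xs.length ≤ k := Nat.le_of_succ_le_succ hl
        by_cases h : x = c
        · subst h
          have h1 := (ih xs hxs).1 (d + 1)
          simp only [calc_dup_ct_loop, show (1 : Int) + 1 = 2 from rfl, if_true] at *
          rw [h1]
          simp only [pvSpanEq, if_true]
          rw [go_spanEq x xs]
          have hdiv : ((pvSpanEq x xs).1 + 1 + 1) / 2 = (pvSpanEq x xs).1 / 2 + 1 := by omega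
          rw [hdiv]
          push_cast
          ring
        · have h2 := (ih xs hxs).2 x d
          have hne : ¬ (some x = some c) := by simp [h]
          simp only [calc_dup_ct_loop, if_neg hne]
          rw [h2]
          simp only [pvSpanEq, if_neg h, calc_dup_ct_go]
          push_cast
          ring

-- ===== VERDICT (by name: the statement is the Claim_ definition above) =====
theorem calc_dup_ct_spec : Claim_equal_calc_dup_ct := by
  intro S _
  unfold Spec_calc_dup_ct calc_dup_ct calc_dup_ct_alt
  have := (loop_invariant S.toList.length S.toList le_rfl).1 0
  simpa using this
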